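-- pv_equiv track=rewrite | github.com/earthai-tech/pycsamt | pycsamt/utils/plot_utils.py | fmt_text
-- ===== SOURCE A (Python) =====
-- def fmt_text (data_text, fmt='~', leftspace = 3, return_to_line =77) :
--     """
--     Allow to format report with data text , fm and leftspace
--
--     :param  data_text: a long text
--     :type  data_text: str
--
--     :param fmt:  type of underline text
--     :type fmt: str
--
--     :param leftspae: How many space do you want before
--                     starting wrinting report .
--     :type leftspae: int
--
--     :param return_to_line: number of character to return to line
--     :type return_to_line: int
--     """
--
--     return_to_line= int(return_to_line)
--     begin_text= leftspace *' '
--     text= begin_text + fmt*(return_to_line +7) + '\n'+ begin_text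
--
--
--     ss=0
--
--     for  ii, num in enumerate(data_text) :
--         if ii == len(data_text)-1 :
--             #text = text + data_text[ss:] + ' {0}\n'.format(fmt)
--             # take the remain and add return chariot
--             text = text+ ' {0}\n'.format(fmt) + \
--                 begin_text +fmt*(return_to_line+7) +'\n'
--
--             break
--         if ss == return_to_line :
--             if data_text[ii+1] !=' ' :
--                 text = '{0} {1}- \n {2} '.format(
--                     text,  fmt, begin_text + fmt )
--             else :
--                 text ='{0} {1} \n {2} '.format(text, fmt, begin_text+fmt )
--             ss=0
--         text += num    # add charatecter
--         ss +=1
--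
--     return text
-- ===== SOURCE B (Python) =====
-- def fmt_text(data_text, fmt='~', leftspace=3, return_to_line=77):
--     rtl = int(return_to_line)
--     begin = leftspace * ' '
--     rule = begin + fmt * (rtl + 7)
--     parts = [rule, '\n', begin]
--     if not data_text:
--         return ''.join(parts)
--     body = data_text[:-1]
--     bounds = range(rtl, len(body), rtl) if rtl > 0 else []
--     prev = 0
--     for i in bounds:
--         parts.append(body[prev:i])
--         sep = '- \n ' if data_text[i + 1] != ' ' else ' \n '
--         parts.append(' ' + fmt + sep + begin + fmt + ' ')
--         prev = i
--     parts.append(body[prev:])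
--     parts.append(' ' + fmt + '\n' + rule + '\n')
--     return ''.join(parts)
-- ===== Notes on version B (the rewrite author's own statement) =====
-- stated objective: alternative
-- what changed: B precomputes the break positions (rtl, 2*rtl, ... within data_text[:-1]) and assembles the report from whole slices collected in a list and joined once, instead of A's character-by-character enumerate loop with a running counter and repeated string concatenation.
-- intended difference: For return_to_line=0 with a data_text of length >= 2, A's counter reset makes it insert exactly one spurious line-break marker before the very first character and never again; B inserts no break for a non-positive wrap width, which is the intended behaviour for a degenerate width. — e.g. on fmt_text("ab", "~", 0, 0): A returns "~~~~~~~\n ~- \n ~ a ~\n~~~~~~~\n", B returns "~~~~~~~\na ~\n~~~~~~~\n"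
import Mathlib
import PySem

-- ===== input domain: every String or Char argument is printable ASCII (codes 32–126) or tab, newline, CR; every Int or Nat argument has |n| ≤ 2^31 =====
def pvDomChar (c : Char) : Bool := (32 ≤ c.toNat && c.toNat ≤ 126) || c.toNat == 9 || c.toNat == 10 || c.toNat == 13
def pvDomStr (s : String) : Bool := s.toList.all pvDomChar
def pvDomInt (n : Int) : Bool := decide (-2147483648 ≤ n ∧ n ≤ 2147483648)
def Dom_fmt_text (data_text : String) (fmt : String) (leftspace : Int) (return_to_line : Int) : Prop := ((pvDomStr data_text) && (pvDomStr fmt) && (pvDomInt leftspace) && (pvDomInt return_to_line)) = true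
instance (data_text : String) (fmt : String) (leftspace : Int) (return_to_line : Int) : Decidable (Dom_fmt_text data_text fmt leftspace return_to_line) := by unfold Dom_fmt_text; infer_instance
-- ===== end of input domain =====

-- B builds the report from slices at precomputed break positions instead of A's
-- char-by-char loop with a running counter (objective: alternative decomposition);
-- for return_to_line = 0 B inserts no break where A inserts one spurious one (see D_).

-- ===== PORT A =====
-- the enumerate loop: remaining characters, running counter ss, accumulated text;
-- 'ii == len(data_text)-1' is the 'exactly one character left' case.
def fmtLoopA (fl begin_ bar : List Char) (rtl : Int) :
    List Char → Int → List Char → List Char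
  | [], _, text => text
  | [_], _, text => text ++ (' ' :: fl) ++ ('\n' :: begin_) ++ bar ++ ['\n']
  | c :: d :: rest, ss, text =>
    if ss = rtl then
      if d ≠ ' ' then
        fmtLoopA fl begin_ bar rtl (d :: rest) (0 + 1)
          ((text ++ (' ' :: fl) ++ ('-' :: ' ' :: '\n' :: ' ' :: begin_) ++ fl ++ [' ']) ++ [c])
      else
        fmtLoopA fl begin_ bar rtl (d :: rest) (0 + 1)
          ((text ++ (' ' :: fl) ++ (' ' :: '\n' :: ' ' :: begin_) ++ fl ++ [' ']) ++ [c])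
    else
      fmtLoopA fl begin_ bar rtl (d :: rest) (ss + 1) (text ++ [c])

def fmt_text (data_text : String) (fmt : String) (leftspace : Int) (return_to_line : Int) : String :=
  let rtl := return_to_line
  let fl := fmt.toList
  let begin_ := PySem.List.pyRepeat [' '] leftspace
  let bar := PySem.List.pyRepeat fl (rtl + 7)
  String.ofList (fmtLoopA fl begin_ bar rtl data_text.toList 0 (begin_ ++ bar ++ ('\n' :: begin_)))

-- ===== PORT B =====
-- one fold step of Source B's 'for i in bounds' loop: emit the slice body[prev:i] and a break marker
def fmtStepB (T fl begin_ body : List Char) (st : List Char × Int) (i : Int) : List Char × Int :=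
  let sep := if (PySem.List.pyGet? T (i + 1)).getD ' ' ≠ ' ' then
      ['-', ' ', '\n', ' '] else [' ', '\n', ' ']
  (st.1 ++ PySem.List.slice body (some st.2) (some i) ++ (' ' :: fl) ++ sep ++ begin_ ++ fl ++ [' '], i)

def fmt_text_alt (data_text : String) (fmt : String) (leftspace : Int) (return_to_line : Int) : String :=
  let rtl := return_to_line
  let fl := fmt.toList
  let begin_ := PySem.List.pyRepeat [' '] leftspace
  let rule := begin_ ++ PySem.List.pyRepeat fl (rtl + 7)
  let header := rule ++ ('\n' :: begin_)
  let T := data_text.toList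
  if T.isEmpty then String.ofList header
  else
    let body := PySem.List.slice T none (some (-1))
    let bounds : List Int :=
      if rtl > 0 then PySem.List.pyRange rtl (body.length : Int) rtl else []
    let res := bounds.foldl (fmtStepB T fl begin_ body) (header, 0)
    String.ofList (res.1 ++ PySem.List.slice body (some res.2) none ++ (' ' :: fl) ++ ('\n' :: rule) ++ ['\n'])

-- ===== PRECONDITION & SPEC =====
-- For return_to_line = 0 and data_text of length >= 2, A's counter reset inserts exactly one
-- spurious break marker before the very first character and never again; B inserts no break for
-- a non-positive wrap width, which is the intended behaviour for a degenerate width.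
def D_fmt_text (data_text : String) (fmt : String) (leftspace : Int) (return_to_line : Int) : Prop :=
  return_to_line = 0 ∧ 2 ≤ data_text.toList.length
instance (data_text : String) (fmt : String) (leftspace : Int) (return_to_line : Int) : Decidable (D_fmt_text data_text fmt leftspace return_to_line) := by unfold D_fmt_text; infer_instance

def Spec_fmt_text (data_text : String) (fmt : String) (leftspace : Int) (return_to_line : Int) (out : String) : Prop := ¬ D_fmt_text data_text fmt leftspace return_to_line → out = fmt_text_alt data_text fmt leftspace return_to_line
instance (data_text : String) (fmt : String) (leftspace : Int) (return_to_line : Int) (out : String) : Decidable (Spec_fmt_text data_text fmt leftspace return_to_line out) := by unfold Spec_fmt_text; infer_instance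

def pvDiffWitness_fmt_text : String × String × Int × Int := ("ab", "~", 0, 0)
def pvDiffWitnessOut_fmt_text : String × String :=
  ("~~~~~~~\n ~- \n ~ a ~\n~~~~~~~\n", "~~~~~~~\na ~\n~~~~~~~\n")

-- ===== CLAIM (what is proved, stated in full; the proofs are below) =====
def Claim_unchanged_fmt_text : Prop := ∀ (data_text : String) (fmt : String) (leftspace : Int) (return_to_line : Int), Dom_fmt_text data_text fmt leftspace return_to_line → Spec_fmt_text data_text fmt leftspace return_to_line (fmt_text data_text fmt leftspace return_to_line)
def Claim_changed_fmt_text : Prop := Dom_fmt_text (pvDiffWitness_fmt_text.1) (pvDiffWitness_fmt_text.2.1) (pvDiffWitness_fmt_text.2.2.1) (pvDiffWitness_fmt_text.2.2.2) ∧ D_fmt_text (pvDiffWitness_fmt_text.1) (pvDiffWitness_fmt_text.2.1) (pvDiffWitness_fmt_text.2.2.1) (pvDiffWitness_fmt_text.2.2.2) ∧ fmt_text (pvDiffWitness_fmt_text.1) (pvDiffWitness_fmt_text.2.1) (pvDiffWitness_fmt_text.2.2.1) (pvDiffWitness_fmt_text.2.2.2) = pvDiffWitnessOut_fmt_text.1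 ∧ fmt_text_alt (pvDiffWitness_fmt_text.1) (pvDiffWitness_fmt_text.2.1) (pvDiffWitness_fmt_text.2.2.1) (pvDiffWitness_fmt_text.2.2.2) = pvDiffWitnessOut_fmt_text.2 ∧ pvDiffWitnessOut_fmt_text.1 ≠ pvDiffWitnessOut_fmt_text.2
def Claim_exact_fmt_text : Prop := ∀ (data_text : String) (fmt : String) (leftspace : Int) (return_to_line : Int), Dom_fmt_text data_text fmt leftspace return_to_line → D_fmt_text data_text fmt leftspace return_to_line → fmt_text data_text fmt leftspace return_to_line ≠ fmt_text_alt data_text fmt leftspace return_to_line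

-- ===== LEMMAS AND PROOFS =====

-- the closing underline block appended by both programs
def pvTail (fl begin_ bar : List Char) : List Char :=
  (' ' :: fl) ++ ('\n' :: begin_) ++ bar ++ ['\n']

-- the break marker inserted for lookahead character d
def pvMark (fl begin_ : List Char) (d : Char) : List Char :=
  (' ' :: fl) ++ (if d ≠ ' ' then ['-', ' ', '\n', ' '] else [' ', '\n', ' ']) ++ begin_ ++ fl ++ [' ']

-- B's final assembly, as a function of the fold result
def pvFinish (fl begin_ bar body : List Char) (res : List Char × Int) : List Char :=
  res.1 ++ PySem.List.slice body (some res.2) none ++ pvTail fl begin_ bar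

lemma pvRangeNil (a b s : Int) (hs : 0 < s) (hba : b ≤ a) :
    PySem.List.pyRange a b s = [] := by
  rw [PySem.List.pyRange_of_pos a b hs, if_neg (by omega)]
  simp

lemma pvRangeConsPos (a b s : Int) (hs : 0 < s) (hab : a < b) :
    PySem.List.pyRange a b s = a :: PySem.List.pyRange (a + s) b s := by
  rw [PySem.List.pyRange_of_pos a b hs, PySem.List.pyRange_of_pos (a + s) b hs,
    if_pos hab]
  have hq1 : 1 ≤ (b - a + s - 1) / s := by
    rw [Int.le_ediv_iff_mul_le hs]; omega
  by_cases h2 : a + s < b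
  · rw [if_pos h2]
    have hsplit : b - a + s - 1 = (b - (a + s) + s - 1) + 1 * s := by ring
    have : (b - a + s - 1) / s = (b - (a + s) + s - 1) / s + 1 := by
      rw [hsplit, Int.add_mul_ediv_right _ _ (by omega)]
    rw [this]
    have hq0 : 0 ≤ (b - (a + s) + s - 1) / s := by
      apply Int.ediv_nonneg <;> omega
    rw [show ((b - (a + s) + s - 1) / s + 1).toNat = ((b - (a + s) + s - 1) / s).toNat + 1 by omega]
    rw [List.range_succ_eq_map]
    simp only [List.map_cons, List.map_map]
    simp only [Nat.cast_zero, mul_zero, add_zero]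
    congr 1
    apply List.map_congr_left
    intro k _
    simp only [Function.comp_apply]
    push_cast
    ring
  · rw [if_neg h2]
    have hq2 : (b - a + s - 1) / s < 2 := by
      rw [Int.ediv_lt_iff_lt_mul hs]; omega
    rw [show ((b - a + s - 1) / s).toNat = 1 by omega]
    simp

-- chunk absorption: while the counter never hits rtl and the last character is not
-- reached, A's loop just appends the characters it passes
lemma pvChunk (fl begin_ bar : List Char) (rtl : Int) :
    ∀ (u v text : List Char) (ss : Int), v ≠ [] →
      (∀ j : Nat, j < u.length → ss + j ≠ rtl) →
      fmtLoopA fl begin_ bar rtl (u ++ v) ss text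
        = fmtLoopA fl begin_ bar rtl v (ss + u.length) (text ++ u) := by
  intro u
  induction u with
  | nil => intro v text ss _ _; simp
  | cons c u' ih =>
    intro v text ss hv h
    have hne : u' ++ v ≠ [] := by simp [hv]
    obtain ⟨d, rest, hdr⟩ : ∃ d rest, u' ++ v = d :: rest := by
      cases hcase : u' ++ v with
      | nil => exact absurd hcase hne
      | cons x xs => exact ⟨x, xs, rfl⟩
    have hss : ss ≠ rtl := by have := h 0 (by simp); simpa using this
    have := ih v (text ++ [c]) (ss + 1) hv (by
      intro j hj
      have := h (j + 1) (by simpa using Nat.succ_lt_succ hj)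
      push_cast at this ⊢; omega)
    rw [List.cons_append, hdr] at *
    rw [show fmtLoopA fl begin_ bar rtl (c :: d :: rest) ss text
        = fmtLoopA fl begin_ bar rtl (d :: rest) (ss + 1) (text ++ [c]) by
      simp [fmtLoopA, hss]]
    rw [this]
    congr 1
    · push_cast [List.length_cons]; ring
    · simp

-- when no break position remains before the end, A's loop appends the rest of the
-- body and closes the report
lemma pvFinal (fl begin_ bar : List Char) (rtl : Int) (body : List Char) (z : Char)
    (k p : Nat) (out : List Char) (_hk : k ≤ body.length) (hp : p ≤ k)
    (hnom : ∀ j : Nat, j < body.length - k → ((k : Int) - p) + j ≠ rtl) :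
    fmtLoopA fl begin_ bar rtl (body.drop k ++ [z]) ((k : Int) - p)
        (out ++ (body.drop p).take (k - p))
      = out ++ body.drop p ++ pvTail fl begin_ bar := by
  rw [pvChunk fl begin_ bar rtl (body.drop k) [z] _ _ (by simp)
    (by simpa using hnom)]
  have hdk : body.drop k = (body.drop p).drop (k - p) := by
    rw [List.drop_drop]; congr 1; omega
  have : out ++ (body.drop p).take (k - p) ++ body.drop k = out ++ body.drop p := by
    rw [hdk, List.append_assoc, List.take_append_drop]
  simp only [fmtLoopA, pvTail]
  rw [this]
  simp

-- main invariant for rtl > 0: at position k with last break at p, A's remaining loop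
-- equals B's fold over the remaining break positions
lemma pvMain (fl begin_ bar : List Char) (rtl : Int) (hrtl : 0 < rtl)
    (body : List Char) (z : Char) :
    ∀ (m k p : Nat) (out : List Char),
      body.length - k ≤ m → k ≤ body.length → p ≤ k → (k : Int) - p ≤ rtl →
      fmtLoopA fl begin_ bar rtl (body.drop k ++ [z]) ((k : Int) - p)
          (out ++ (body.drop p).take (k - p))
        = pvFinish fl begin_ bar body
            ((PySem.List.pyRange ((p : Int) + rtl) (body.length : Int) rtl).foldl
              (fmtStepB (body ++ [z]) fl begin_ body) (out, (p : Int))) := by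
  intro m
  induction m with
  | zero =>
    intro k p out hm hk hp hkp
    have hkn : k = body.length := by omega
    rw [pvRangeNil _ _ _ hrtl (by omega), List.foldl_nil]
    rw [pvFinal fl begin_ bar rtl body z k p out (by omega) hp (by intro j hj; omega)]
    simp [pvFinish, PySem.List.slice_from body (by positivity : (0:Int) ≤ (p:Int))]
  | succ m ih =>
    intro k p out hm hk hp hkp
    by_cases hb : (p : Int) + rtl < (body.length : Int)
    · -- a break position b = p + rtl lies inside the body
      set bN : Nat := p + rtl.toNat with hbN
      have hbcast : ((bN : Nat) : Int) = (p : Int) + rtl := by omega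
      have hkb : k ≤ bN := by omega
      have hbn : bN < body.length := by omega
      -- advance over the chunk body[k:bN]
      have hsplit : body.drop k ++ [z]
          = ((body.drop k).take (bN - k)) ++ (body.drop bN ++ [z]) := by
        rw [← List.append_assoc]
        congr 1
        have : body.drop bN = (body.drop k).drop (bN - k) := by
          rw [List.drop_drop]; congr 1; omega
        rw [this, List.take_append_drop]
      have hulen : ((body.drop k).take (bN - k)).length = bN - k := by
        simp; omega
      rw [hsplit, pvChunk fl begin_ bar rtl _ _ _ _ (by simp)
        (by intro j hj; rw [hulen] at hj; omega)]
      have hss : ((k : Int) - p) + (((body.drop k).take (bN - k)).length : Int) = rtl := by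
        rw [hulen]; omega
      rw [hss]
      have htake : (body.drop p).take (k - p) ++ (body.drop k).take (bN - k)
          = (body.drop p).take (bN - p) := by
        have h1 : bN - p = (k - p) + (bN - k) := by omega
        have h2 : (body.drop p).drop (k - p) = body.drop k := by
          rw [List.drop_drop]; congr 1; omega
        rw [h1, List.take_add, h2]
      -- the break step: one marker, then the character body[bN]
      have hdrop : body.drop bN = body[bN] :: body.drop (bN + 1) :=
        List.drop_eq_getElem_cons hbn
      obtain ⟨d, rest, hdr⟩ : ∃ d rest, body.drop (bN + 1) ++ [z] = d :: rest := by
        cases hcase : body.drop (bN + 1) ++ [z] with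
        | nil => simp at hcase
        | cons x xs => exact ⟨x, xs, rfl⟩
      have hstep : ∀ text : List Char,
          fmtLoopA fl begin_ bar rtl (body[bN] :: d :: rest) rtl text
            = fmtLoopA fl begin_ bar rtl (d :: rest) 1
                ((text ++ pvMark fl begin_ d) ++ [body[bN]]) := by
        intro text
        by_cases hd : d = ' ' <;> · simp [fmtLoopA, pvMark, hd]
      rw [hdrop]
      rw [List.cons_append, hdr, hstep]
      -- fold one step on the B side
      rw [pvRangeConsPos _ _ _ hrtl hb, List.foldl_cons]
      have hsep : (PySem.List.pyGet? (body ++ [z]) ((p : Int) + rtl + 1)).getD ' ' = d := by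
        have h1 : (p : Int) + rtl + 1 = ((bN + 1 : Nat) : Int) := by push_cast; omega
        have h2 : (body ++ [z]).drop (bN + 1) = d :: rest := by
          rw [List.drop_append_of_le_length (by omega), hdr]
        have h3 : (body ++ [z])[bN + 1]? = some d := by
          rw [← List.head?_drop, h2]; rfl
        rw [h1, PySem.List.pyGet?_natCast, h3]
        rfl
      have hslice : PySem.List.slice body (some (p : Int)) (some ((p : Int) + rtl))
          = (body.drop p).take (bN - p) := by
        rw [PySem.List.slice_toNat body (by positivity) (by omega)]
        congr 1
        omega
      have hstepB : fmtStepB (body ++ [z]) fl begin_ body (out, (p : Int)) ((p : Int) + rtl)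
          = (out ++ (body.drop p).take (bN - p) ++ pvMark fl begin_ d, (p : Int) + rtl) := by
        simp only [fmtStepB, hsep, hslice, pvMark]
        simp [List.append_assoc]
      rw [hstepB]
      -- recurse from position bN + 1 with last break bN
      have ihres := ih (bN + 1) bN
        (out ++ (body.drop p).take (bN - p) ++ pvMark fl begin_ d)
        (by omega) (by omega) (by omega) (by push_cast; omega)
      have htake1 : (body.drop bN).take ((bN + 1) - bN) = [body[bN]] := by
        rw [show bN + 1 - bN = 1 by omega, hdrop, List.take_succ_cons, List.take_zero]
      rw [htake1] at ihres
      rw [hdr] at ihres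
      rw [show ((bN + 1 : Nat) : Int) - ((bN : Nat) : Int) = 1 by push_cast; ring] at ihres
      have htext : out ++ (body.drop p).take (k - p) ++ (body.drop k).take (bN - k)
          = out ++ (body.drop p).take (bN - p) := by
        rw [List.append_assoc, htake]
      rw [htext, ← hbcast]
      exact ihres
    · -- no break position remains: the rest of the body is one chunk
      rw [pvRangeNil _ _ _ hrtl (by omega), List.foldl_nil]
      rw [pvFinal fl begin_ bar rtl body z k p out (by omega) hp (by
        intro j hj
        have : ((k : Int) - p) + j < rtl := by omega
        omega)]
      simp [pvFinish, PySem.List.slice_from body (by positivity : (0:Int) ≤ (p:Int))]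

-- for rtl = 0 and at least two characters: A's loop output, in closed form
lemma pvAZero (fl begin_ bar : List Char) (c d : Char) (rest header : List Char) :
    fmtLoopA fl begin_ bar 0 (c :: d :: rest) 0 header
      = header ++ pvMark fl begin_ d ++ (c :: (d :: rest).dropLast)
          ++ pvTail fl begin_ bar := by
  have hne : d :: rest ≠ [] := by simp
  have hTz : d :: rest = (d :: rest).dropLast ++ [(d :: rest).getLast hne] :=
    (List.dropLast_append_getLast hne).symm
  have hstep : fmtLoopA fl begin_ bar 0 (c :: d :: rest) 0 header
      = fmtLoopA fl begin_ bar 0 (d :: rest) 1 ((header ++ pvMark fl begin_ d) ++ [c]) := by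
    by_cases hd : d = ' ' <;> · simp [fmtLoopA, pvMark, hd]
  rw [hstep]
  conv_lhs => rw [hTz]
  rw [pvChunk fl begin_ bar 0 (d :: rest).dropLast [(d :: rest).getLast hne] _ 1 (by simp)
    (by intro j _; omega)]
  simp [fmtLoopA, pvTail, List.append_assoc]

-- ===== VERDICT (by name: the statement is the Claim_ definition above) =====
theorem fmt_text_spec : Claim_unchanged_fmt_text := by
  intro data_text fmt leftspace return_to_line _ hnD
  unfold fmt_text fmt_text_alt
  dsimp only
  cases hT : data_text.toList with
  | nil => simp [fmtLoopA]
  | cons a as =>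
    simp only [List.isEmpty_cons, Bool.false_eq_true, if_false,
      PySem.List.slice_to_neg_one]
    have hne : a :: as ≠ [] := by simp
    have hTz : a :: as = (a :: as).dropLast ++ [(a :: as).getLast hne] :=
      (List.dropLast_append_getLast hne).symm
    set fl := fmt.toList
    set begin_ := PySem.List.pyRepeat [' '] leftspace
    set bar := PySem.List.pyRepeat fl (return_to_line + 7)
    set body := (a :: as).dropLast with hbody
    set z := (a :: as).getLast hne
    rcases lt_trichotomy return_to_line 0 with h | h | h
    · -- rtl < 0 : no break position is ever reached
      rw [if_neg (by omega : ¬ return_to_line > 0), List.foldl_nil]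
      conv_lhs => rw [hTz]
      rw [pvChunk fl begin_ bar return_to_line body [z] _ 0 (by simp)
        (by intro j _; omega)]
      rw [PySem.List.slice_from body (by norm_num : (0:Int) ≤ 0)]
      simp [fmtLoopA, List.append_assoc]
    · -- rtl = 0 : ¬D forces length ≤ 1, so as = []
      have has : as = [] := by
        cases as with
        | nil => rfl
        | cons b bs => exact absurd ⟨h, by rw [hT]; simp⟩ hnD
      subst has
      rw [if_neg (by omega : ¬ return_to_line > 0), List.foldl_nil]
      rw [PySem.List.slice_from body (by norm_num : (0:Int) ≤ 0)]
      simp [fmtLoopA, hbody, List.append_assoc]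
    · -- rtl > 0 : the break positions are rtl, 2·rtl, …
      rw [if_pos (by omega : return_to_line > 0)]
      have key := pvMain fl begin_ bar return_to_line h body z
        body.length 0 0 (begin_ ++ bar ++ ('\n' :: begin_))
        (by omega) (by omega) (by omega) (by simp; omega)
      simp only [List.drop_zero, List.take_zero, List.append_nil, Nat.cast_zero,
        sub_zero, zero_add, Nat.sub_zero] at key
      conv_lhs => rw [hTz]
      rw [key, ← hTz]
      simp [pvFinish, pvTail, List.append_assoc]

theorem fmt_text_changed : Claim_changed_fmt_text := by
  unfold Claim_changed_fmt_text
  refine ⟨by decide, by decide, ?_, by decide, by decide⟩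
  decide

theorem fmt_text_tight : Claim_exact_fmt_text := by
  intro data_text fmt leftspace return_to_line _ hD heq
  obtain ⟨h0, hlen⟩ := hD
  subst h0
  obtain ⟨c, d, rest, hT⟩ : ∃ c d rest, data_text.toList = c :: d :: rest := by
    cases hc : data_text.toList with
    | nil => rw [hc] at hlen; simp at hlen
    | cons x xs =>
      cases hx : xs with
      | nil => rw [hc, hx] at hlen; simp at hlen
      | cons y ys => exact ⟨x, y, ys, rfl⟩
  unfold fmt_text fmt_text_alt at heq
  dsimp only at heq
  rw [hT] at heq
  simp only [List.isEmpty_cons, Bool.false_eq_true, if_false,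
    PySem.List.slice_to_neg_one, if_neg (by omega : ¬ (0:Int) > 0),
    List.foldl_nil] at heq
  set fl := fmt.toList
  set begin_ := PySem.List.pyRepeat [' '] leftspace
  set bar := PySem.List.pyRepeat fl ((0:Int) + 7)
  rw [pvAZero fl begin_ bar c d rest _] at heq
  rw [PySem.List.slice_from ((c :: d :: rest).dropLast) (by norm_num : (0:Int) ≤ 0)] at heq
  have hlist := congrArg String.toList heq
  simp only [String.toList_ofList] at hlist
  have hlenEq := congrArg List.length hlist
  simp only [pvMark, pvTail, List.dropLast_cons₂] at hlenEq
  by_cases hd : d = ' ' <;> simp [hd] at hlenEq <;> omega
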